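-- pv_equiv track=rewrite | github.com/Qianyue-Wang1/NAACL-25-DOME-story-generation | pipline/MEM.py | group_by_s1
-- ===== SOURCE A (Python) =====
-- def group_by_s1(nei_timeinfo):
--     #(en,r,en,-)
--     grouped_tuples = {}
--     for tpl in nei_timeinfo:
--         key = tuple(tpl[:3])  # 取前两个元素作为键
--         if key not in grouped_tuples:
--             grouped_tuples[key] = []
--         grouped_tuples[key].append(tpl)
--     res=list(grouped_tuples.values())
--     ress=[]
--     keep_triple=[]
--     for i in res:
--         if len(i)==1:
--             keep_triple.append(i[0])
--         else:
--              ress.append(i)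
--
--
--     return ress,keep_triple
-- ===== SOURCE B (Python) =====
-- def group_by_s1(nei_timeinfo):
--     # One counting pass, then one routing pass: tuples whose 3-prefix key is
--     # unique go straight to keep_triple; the rest are appended into an
--     # insertion-ordered dict of groups whose values become ress.
--     counts = {}
--     for tpl in nei_timeinfo:
--         k = tuple(tpl[:3])
--         counts[k] = counts.get(k, 0) + 1
--     groups = {}
--     keep_triple = []
--     for tpl in nei_timeinfo:
--         k = tuple(tpl[:3])
--         if counts[k] == 1:
--             keep_triple.append(tpl)
--         else:
--             groups.setdefault(k, []).append(tpl)
--     return list(groups.values()), keep_triple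
-- ===== Notes on version B (the rewrite author's own statement) =====
-- stated objective: alternative
-- what changed: Instead of grouping everything into a dict and then partitioning the value lists by length, B first counts key occurrences in one pass and then routes each tuple in a second pass: unique-key tuples go directly to keep_triple, the rest into an order-preserving dict of groups whose values become ress.
import Mathlib
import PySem

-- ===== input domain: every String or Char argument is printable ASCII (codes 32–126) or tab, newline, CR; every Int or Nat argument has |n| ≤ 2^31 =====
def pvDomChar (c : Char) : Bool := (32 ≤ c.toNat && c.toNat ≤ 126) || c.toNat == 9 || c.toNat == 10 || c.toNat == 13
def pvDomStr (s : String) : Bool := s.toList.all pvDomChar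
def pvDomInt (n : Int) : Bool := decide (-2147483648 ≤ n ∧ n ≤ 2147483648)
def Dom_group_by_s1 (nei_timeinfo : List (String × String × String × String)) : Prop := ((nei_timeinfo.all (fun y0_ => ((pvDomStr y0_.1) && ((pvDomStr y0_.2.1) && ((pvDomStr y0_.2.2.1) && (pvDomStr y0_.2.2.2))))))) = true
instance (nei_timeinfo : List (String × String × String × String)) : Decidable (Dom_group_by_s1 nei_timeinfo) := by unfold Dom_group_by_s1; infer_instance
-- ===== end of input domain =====

-- B re-implements the grouping as a counting pass followed by a single routing pass
-- (unique-key tuples go straight to keep_triple); equivalence of return values is proved.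

-- tuple(tpl[:3]) — shared helper of both ports
def pvKey (t : String × String × String × String) : String × String × String := (t.1, t.2.1, t.2.2.1)

-- ===== PORT A =====
def group_by_s1 (nei_timeinfo : List (String × String × String × String)) :
    (List (List (String × String × String × String))) × (List (String × String × String × String)) :=
  let grouped := nei_timeinfo.foldl (fun d tpl =>
      let key := pvKey tpl
      let d' := if d.contains key then d else d.insert key []
      d'.modify key [] (fun l => l ++ [tpl])) PySem.Dict.empty
  let res := grouped.values
  let p := res.foldl (fun acc i =>
      if i.length == 1 then
        -- i[0]: under the guard i has length 1, so headD is exact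
        (acc.1, acc.2 ++ [i.headD ("", "", "", "")])
      else (acc.1 ++ [i], acc.2))
    (([], []) : (List (List (String × String × String × String))) × (List (String × String × String × String)))
  (p.1, p.2)

-- ===== PORT B =====
def group_by_s1_alt (nei_timeinfo : List (String × String × String × String)) :
    (List (List (String × String × String × String))) × (List (String × String × String × String)) :=
  let counts : PySem.Dict (String × String × String) Int :=
    nei_timeinfo.foldl (fun d tpl =>
      let k := pvKey tpl
      d.insert k (d.getD k 0 + 1)) PySem.Dict.empty
  let st := nei_timeinfo.foldl (fun st tpl =>
      let k := pvKey tpl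
      -- counts[k]: k is always a key of counts, so getD is exact
      if counts.getD k 0 == 1 then (st.1, st.2 ++ [tpl])
      else (st.1.modify k [] (fun l => l ++ [tpl]), st.2))
    ((PySem.Dict.empty, []) : PySem.Dict (String × String × String) (List (String × String × String × String)) × List (String × String × String × String))
  (st.1.values, st.2)

-- ===== PRECONDITION & SPEC =====
def Spec_group_by_s1 (nei_timeinfo : List (String × String × String × String)) (out : (List (List (String × String × String × String))) × (List (String × String × String × String))) : Prop := out = group_by_s1_alt nei_timeinfo
instance (nei_timeinfo : List (String × String × String × String)) (out : (List (List (String × String × String × String))) × (List (String × String × String × String))) : Decidable (Spec_group_by_s1 nei_timeinfo out) := by unfold Spec_group_by_s1; infer_instance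

-- ===== CLAIM (what is proved, stated in full; the proofs are below) =====
def Claim_equal_group_by_s1 : Prop := ∀ (nei_timeinfo : List (String × String × String × String)), Dom_group_by_s1 nei_timeinfo → Spec_group_by_s1 nei_timeinfo (group_by_s1 nei_timeinfo)

-- ===== LEMMAS AND PROOFS =====

abbrev PvT : Type := String × String × String × String
abbrev PvK : Type := String × String × String

def pvDflt : PvT := ("", "", "", "")

-- the group of key k: all tuples of xs whose 3-prefix is k
def pvGrp (xs : List PvT) (k : PvK) : List PvT := xs.filter (fun t => pvKey t == k)

-- the distinct keys of xs, in first-appearance order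
def pvKeys (xs : List PvT) : List PvK := PySem.Set.ofList (xs.map pvKey)

-- the plain grouping fold (A's fold after dropping the redundant pre-insert)
def pvGm (xs : List PvT) : PySem.Dict PvK (List PvT) :=
  xs.foldl (fun d t => d.modify (pvKey t) [] (fun g => g ++ [t])) PySem.Dict.empty

-- inserting a fresh key then overwriting it is one insert
lemma pv_insert_insert {κ ν : Type} [BEq κ] [LawfulBEq κ] (d : PySem.Dict κ ν) (k : κ) (v₀ v : ν)
    (h : d.contains k = false) : (d.insert k v₀).insert k v = d.insert k v := by
  have hk : ∀ p ∈ d.items, (p.1 == k) = false := by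
    intro p hp
    rw [beq_eq_false_iff_ne]
    intro hpk
    have hmem := PySem.Dict.mem_keys_of_mem_items d hp
    rw [hpk] at hmem
    have hc := (PySem.Dict.contains_iff_mem_keys d k).mpr hmem
    rw [h] at hc
    exact Bool.noConfusion hc
  apply PySem.Dict.ext
  rw [PySem.Dict.items_insert_of_contains _ v (PySem.Dict.contains_insert_self d k v₀),
      PySem.Dict.items_insert_of_not_contains _ v₀ h,
      PySem.Dict.items_insert_of_not_contains _ v h, List.map_append]
  congr 1
  · conv_rhs => rw [← List.map_id d.items]
    exact List.map_congr_left fun p hp => by simp [hk p hp]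
  · simp

-- A's loop body equals the plain modify
lemma pvModify_def {κ ν : Type} [BEq κ] (d : PySem.Dict κ ν) (k : κ) (d0 : ν) (f : ν → ν) :
    d.modify k d0 f = d.insert k (f (d.getD k d0)) := rfl

lemma pvStepA (d : PySem.Dict PvK (List PvT)) (t : PvT) :
    (if d.contains (pvKey t) then d else d.insert (pvKey t) ([] : List PvT)).modify (pvKey t) [] (fun g => g ++ [t])
      = d.modify (pvKey t) [] (fun g => g ++ [t]) := by
  cases hc : d.contains (pvKey t)
  · rw [if_neg (by simp), pvModify_def, pvModify_def, PySem.Dict.getD_insert_self,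
        PySem.Dict.getD_of_not_contains d _ hc]
    exact pv_insert_insert d _ _ _ hc
  · simp

lemma pvKeys_Gm (xs : List PvT) : (pvGm xs).keys = pvKeys xs := by
  unfold pvGm pvKeys
  rw [PySem.Dict.keys_foldl_modify_key xs pvKey [] (fun _ t => fun g => g ++ [t]) PySem.Dict.empty,
      PySem.Dict.keys_empty, PySem.Set.update_nil_left]

lemma pvNodup_Gm (xs : List PvT) : (pvGm xs).keys.Nodup := by
  unfold pvGm
  exact PySem.Dict.nodup_keys_foldl_modify_key xs pvKey [] (fun _ t => fun g => g ++ [t]) _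
    PySem.Dict.nodup_keys_empty

lemma pvGetD_Gm (xs : List PvT) (k : PvK) : (pvGm xs).getD k [] = pvGrp xs k := by
  unfold pvGm pvGrp
  have hfold : xs.foldl (fun d t => d.modify (pvKey t) [] (fun g => g ++ [t]))
        (PySem.Dict.empty : PySem.Dict PvK (List PvT))
      = (xs.map (fun t => (pvKey t, t))).foldl
          (fun d p => d.modify p.1 [] (fun g => g ++ [p.2])) PySem.Dict.empty := by
    rw [List.foldl_map]
  rw [hfold, PySem.Dict.getD_foldl_modify_append, PySem.Dict.getD_empty, List.filter_map]
  simp [Function.comp_def]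

-- a dict with distinct keys is its key list decorated with lookups
lemma pvItems_eq_map_keys {κ ν : Type} [BEq κ] [LawfulBEq κ] (d : PySem.Dict κ ν) (v0 : ν)
    (h : d.keys.Nodup) : d.items = d.keys.map (fun k => (k, d.getD k v0)) := by
  have hkeys : d.keys = d.items.map (fun p => p.1) := rfl
  rw [hkeys, List.map_map]
  conv_lhs => rw [← List.map_id d.items]
  apply List.map_congr_left
  intro p hp
  have hp' : (p.1, p.2) ∈ d.items := by simpa using hp
  have hg := PySem.Dict.getD_of_mem_items d hp' h v0
  simp [hg]

lemma pvValues_Gm (xs : List PvT) : (pvGm xs).values = (pvKeys xs).map (pvGrp xs) := by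
  have hv : (pvGm xs).values = (pvGm xs).items.map (fun p => p.2) := rfl
  rw [hv, pvItems_eq_map_keys _ ([] : List PvT) (pvNodup_Gm xs), pvKeys_Gm, List.map_map]
  exact List.map_congr_left fun k _ => by simp [pvGetD_Gm]

-- A's partition loop
lemma pvFoldP (res r : List (List PvT)) (kp : List PvT) :
    res.foldl (fun acc i => if i.length == 1 then (acc.1, acc.2 ++ [i.headD pvDflt]) else (acc.1 ++ [i], acc.2)) (r, kp)
      = (r ++ res.filter (fun i => !(i.length == 1)),
         kp ++ (res.filter (fun i => i.length == 1)).map (fun i => i.headD pvDflt)) := by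
  induction res generalizing r kp with
  | nil => simp
  | cons i res ih =>
    rw [List.foldl_cons]
    by_cases hb : (i.length == 1) = true
    · rw [if_pos hb, ih, List.filter_cons, List.filter_cons]
      simp [hb]
    · rw [if_neg hb, ih, List.filter_cons, List.filter_cons]
      simp [hb]

-- B's routing loop, for any fixed routing predicate c
lemma pvFoldB (c : PvT → Bool) (l : List PvT) (d : PySem.Dict PvK (List PvT)) (kp : List PvT) :
    l.foldl (fun st t => if c t then (st.1, st.2 ++ [t]) else (st.1.modify (pvKey t) [] (fun g => g ++ [t]), st.2)) (d, kp)
      = ((l.filter (fun t => !c t)).foldl (fun d t => d.modify (pvKey t) [] (fun g => g ++ [t])) d,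
         kp ++ l.filter c) := by
  induction l generalizing d kp with
  | nil => simp
  | cons t l ih => cases h : c t <;> simp [h, ih]

-- B's counting pass computes group sizes
lemma pvCounts (xs : List PvT) (k : PvK) :
    (xs.foldl (fun d t => d.insert (pvKey t) (d.getD (pvKey t) 0 + 1)) (PySem.Dict.empty : PySem.Dict PvK Int)).getD k 0
      = ((pvGrp xs k).length : Int) := by
  have hfold : xs.foldl (fun d t => d.insert (pvKey t) (d.getD (pvKey t) 0 + 1))
        (PySem.Dict.empty : PySem.Dict PvK Int)
      = (xs.map pvKey).foldl (fun d k => d.insert k (d.getD k 0 + 1)) PySem.Dict.empty := by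
    rw [List.foldl_map]
  rw [hfold, PySem.Dict.getD_foldl_insert_add_one, PySem.Dict.getD_empty, zero_add]
  have hn : List.count k (xs.map pvKey) = (pvGrp xs k).length := by
    simp [pvGrp, List.count_eq_countP, List.countP_eq_length_filter, List.filter_map,
      Function.comp_def]
  exact_mod_cast hn

-- set(...) commutes with a filter
lemma pvDiscard_eq_filter {α : Type} [BEq α] (s : List α) (x : α) :
    PySem.Set.discard s x = s.filter (fun z => !(z == x)) := rfl

lemma pvOfList_filter {α : Type} [BEq α] [LawfulBEq α] [DecidableEq α] (P : α → Bool) (ys : List α) :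
    PySem.Set.ofList (ys.filter P) = (PySem.Set.ofList ys).filter P := by
  induction ys with
  | nil => rfl
  | cons y ys ih =>
    rw [List.filter_cons, PySem.Set.ofList_cons, List.filter_cons]
    by_cases hy : P y = true
    · rw [if_pos hy, if_pos hy, PySem.Set.ofList_cons, ih,
          pvDiscard_eq_filter, pvDiscard_eq_filter, List.filter_filter, List.filter_filter]
      congr 1
      exact List.filter_congr fun z _ => Bool.and_comm _ _
    · rw [if_neg hy, if_neg hy, ih, pvDiscard_eq_filter, List.filter_filter]
      apply List.filter_congr
      intro z _
      by_cases hzy : z = y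
      · have hy' : P y = false := by revert hy; cases P y <;> simp
        simp [hzy, hy']
      · simp [hzy]

-- the multi-key groups of the routed sublist are exactly the big groups of xs
lemma pvG1 (xs : List PvT) :
    (pvKeys (xs.filter (fun t => !((pvGrp xs (pvKey t)).length == 1)))).map
        (pvGrp (xs.filter (fun t => !((pvGrp xs (pvKey t)).length == 1))))
      = ((pvKeys xs).filter (fun k => !((pvGrp xs k).length == 1))).map (pvGrp xs) := by
  have hkeys : pvKeys (xs.filter (fun t => !((pvGrp xs (pvKey t)).length == 1)))
      = (pvKeys xs).filter (fun k => !((pvGrp xs k).length == 1)) := by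
    unfold pvKeys
    rw [← pvOfList_filter]
    congr 1
    rw [List.filter_map]
    simp [Function.comp_def]
  have hgrp : ∀ k ∈ (pvKeys xs).filter (fun k => !((pvGrp xs k).length == 1)),
      pvGrp (xs.filter (fun t => !((pvGrp xs (pvKey t)).length == 1))) k = pvGrp xs k := by
    intro k hk
    have hPk : (!((pvGrp xs k).length == 1)) = true := (List.mem_filter.mp hk).2
    unfold pvGrp
    rw [List.filter_filter]
    apply List.filter_congr
    intro t _
    by_cases hkt : pvKey t = k
    · simp only [pvGrp] at hPk
      simp [hkt, hPk]
    · simp [hkt]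
  rw [hkeys]
  exact List.map_congr_left hgrp

-- the singleton-key tuples, in input order, are the singleton groups' heads in key order
lemma pvG2 (xs : List PvT) :
    xs.filter (fun t => (pvGrp xs (pvKey t)).length == 1)
      = ((pvKeys xs).filter (fun k => (pvGrp xs k).length == 1)).map (fun k => (pvGrp xs k).headD pvDflt) := by
  induction xs with
  | nil => rfl
  | cons t r ih =>
    have hkc : pvKeys (t :: r) = pvKey t :: PySem.Set.discard (pvKeys r) (pvKey t) := by
      unfold pvKeys; rw [List.map_cons, PySem.Set.ofList_cons]
    have hgrp_self : pvGrp (t :: r) (pvKey t) = t :: pvGrp r (pvKey t) := by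
      unfold pvGrp; rw [List.filter_cons]; simp
    have hgrp_ne : ∀ k, k ≠ pvKey t → pvGrp (t :: r) k = pvGrp r k := by
      intro k hk
      unfold pvGrp; rw [List.filter_cons]
      simp [Ne.symm hk]
    cases hk0 : pvGrp r (pvKey t) with
    | nil =>
      have hno : ∀ v ∈ r, pvKey v ≠ pvKey t := by
        intro v hv hvk
        have hvm : v ∈ pvGrp r (pvKey t) := by
          unfold pvGrp; exact List.mem_filter.mpr ⟨hv, by simp [hvk]⟩
        rw [hk0] at hvm
        exact absurd hvm (List.not_mem_nil)
      have hdisc : PySem.Set.discard (pvKeys r) (pvKey t) = pvKeys r := by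
        rw [pvDiscard_eq_filter]
        apply List.filter_eq_self.mpr
        intro z hz
        have hz' : z ∈ r.map pvKey := (PySem.Set.mem_ofList _ _).mp hz
        obtain ⟨v, hv, hveq⟩ := List.mem_map.mp hz'
        have hzne : z ≠ pvKey t := fun h => hno v hv (hveq.trans h)
        simp [hzne]
      have hst : ((pvGrp (t :: r) (pvKey t)).length == 1) = true := by
        rw [hgrp_self, hk0]; rfl
      rw [List.filter_cons, if_pos hst, hkc, hdisc, List.filter_cons, if_pos hst, List.map_cons]
      have hhead : (pvGrp (t :: r) (pvKey t)).headD pvDflt = t := by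
        rw [hgrp_self, hk0]; rfl
      rw [hhead]
      congr 1
      have hfr : r.filter (fun v => (pvGrp (t :: r) (pvKey v)).length == 1)
          = r.filter (fun v => (pvGrp r (pvKey v)).length == 1) :=
        List.filter_congr fun v hv => by rw [hgrp_ne _ (hno v hv)]
      have hfk : (pvKeys r).filter (fun k => (pvGrp (t :: r) k).length == 1)
          = (pvKeys r).filter (fun k => (pvGrp r k).length == 1) := by
        apply List.filter_congr
        intro k hk
        have hk' : k ∈ r.map pvKey := (PySem.Set.mem_ofList _ _).mp hk
        obtain ⟨v, hv, hveq⟩ := List.mem_map.mp hk'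
        rw [hgrp_ne _ (hveq ▸ hno v hv)]
      rw [hfr, hfk, ih]
      apply List.map_congr_left
      intro k hk
      have hkm : k ∈ pvKeys r := (List.mem_filter.mp hk).1
      have hk' : k ∈ r.map pvKey := (PySem.Set.mem_ofList _ _).mp hkm
      obtain ⟨v, hv, hveq⟩ := List.mem_map.mp hk'
      rw [hgrp_ne _ (hveq ▸ hno v hv)]
    | cons u us =>
      have hsf : ((pvGrp (t :: r) (pvKey t)).length == 1) = false := by
        rw [hgrp_self, hk0]; simp
      rw [List.filter_cons, if_neg (by simp [hsf]), hkc, List.filter_cons, if_neg (by simp [hsf])]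
      have hL : r.filter (fun v => (pvGrp (t :: r) (pvKey v)).length == 1)
          = (r.filter (fun v => (pvGrp r (pvKey v)).length == 1)).filter
              (fun v => !(pvKey v == pvKey t)) := by
        rw [List.filter_filter]
        apply List.filter_congr
        intro v _
        by_cases hvk : pvKey v = pvKey t
        · rw [hvk]; simp [hsf]
        · simp [hvk, hgrp_ne _ hvk]
      have hR : (PySem.Set.discard (pvKeys r) (pvKey t)).filter (fun k => (pvGrp (t :: r) k).length == 1)
          = ((pvKeys r).filter (fun k => (pvGrp r k).length == 1)).filter
              (fun k => !(k == pvKey t)) := by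
        rw [pvDiscard_eq_filter, List.filter_filter, List.filter_filter]
        apply List.filter_congr
        intro k _
        by_cases hkk : k = pvKey t
        · rw [hkk]; simp [hsf]
        · rw [hgrp_ne _ hkk]
          exact Bool.and_comm _ _
      rw [hL, hR, ih, List.filter_map]
      have hkeyhd : ∀ k ∈ (pvKeys r).filter (fun k => (pvGrp r k).length == 1),
          pvKey ((pvGrp r k).headD pvDflt) = k := by
        intro k hk
        have hQ : ((pvGrp r k).length == 1) = true := (List.mem_filter.mp hk).2
        obtain ⟨a, ha⟩ := List.length_eq_one_iff.mp (by simpa using hQ)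
        have hamem : a ∈ pvGrp r k := by rw [ha]; exact List.mem_cons_self
        have hak : (pvKey a == k) = true := (List.mem_filter.mp hamem).2
        rw [ha]
        simpa using hak
      have hff : ((pvKeys r).filter (fun k => (pvGrp r k).length == 1)).filter
              ((fun v => !(pvKey v == pvKey t)) ∘ (fun k => (pvGrp r k).headD pvDflt))
          = ((pvKeys r).filter (fun k => (pvGrp r k).length == 1)).filter
              (fun k => !(k == pvKey t)) := by
        apply List.filter_congr
        intro k hk
        show (!(pvKey ((pvGrp r k).headD pvDflt) == pvKey t)) = (!(k == pvKey t))
        rw [hkeyhd k hk]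
      rw [hff]
      apply List.map_congr_left
      intro k hk
      have hkne : k ≠ pvKey t := by
        have := (List.mem_filter.mp hk).2
        simpa using this
      rw [hgrp_ne _ hkne]

-- canonical forms of the two ports
lemma pvA_eq (xs : List PvT) :
    group_by_s1 xs = (((pvKeys xs).filter (fun k => !((pvGrp xs k).length == 1))).map (pvGrp xs),
                      ((pvKeys xs).filter (fun k => (pvGrp xs k).length == 1)).map (fun k => (pvGrp xs k).headD pvDflt)) := by
  have hfold : xs.foldl (fun d tpl =>
        (if d.contains (pvKey tpl) then d else d.insert (pvKey tpl) []).modify (pvKey tpl) []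
          (fun l => l ++ [tpl])) PySem.Dict.empty = pvGm xs := by
    unfold pvGm
    exact congrArg (fun f => List.foldl f PySem.Dict.empty xs)
      (funext fun d => funext fun t => pvStepA d t)
  show (let grouped := xs.foldl (fun d tpl =>
      let key := pvKey tpl
      let d' := if d.contains key then d else d.insert key []
      d'.modify key [] (fun l => l ++ [tpl])) PySem.Dict.empty
    let res := grouped.values
    let p := res.foldl (fun acc i =>
        if i.length == 1 then (acc.1, acc.2 ++ [i.headD ("", "", "", "")])
        else (acc.1 ++ [i], acc.2)) (([], []) : List (List PvT) × List PvT)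
    (p.1, p.2)) = _
  simp only []
  rw [hfold, pvValues_Gm]
  have hD : ("", "", "", "") = pvDflt := rfl
  rw [hD, pvFoldP]
  simp only [List.nil_append]
  rw [List.filter_map, List.filter_map, List.map_map]
  rfl

lemma pvB_eq (xs : List PvT) :
    group_by_s1_alt xs = (((pvKeys xs).filter (fun k => !((pvGrp xs k).length == 1))).map (pvGrp xs),
                          ((pvKeys xs).filter (fun k => (pvGrp xs k).length == 1)).map (fun k => (pvGrp xs k).headD pvDflt)) := by
  have hcond : ∀ t : PvT,
      ((xs.foldl (fun d tpl => d.insert (pvKey tpl) (d.getD (pvKey tpl) 0 + 1))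
          (PySem.Dict.empty : PySem.Dict PvK Int)).getD (pvKey t) 0 == 1)
        = ((pvGrp xs (pvKey t)).length == 1) := by
    intro t
    rw [pvCounts, Bool.eq_iff_iff]
    simp only [beq_iff_eq]
    omega
  show (let counts : PySem.Dict PvK Int := xs.foldl (fun d tpl =>
        let k := pvKey tpl
        d.insert k (d.getD k 0 + 1)) PySem.Dict.empty
    let st := xs.foldl (fun st tpl =>
        let k := pvKey tpl
        if counts.getD k 0 == 1 then (st.1, st.2 ++ [tpl])
        else (st.1.modify k [] (fun l => l ++ [tpl]), st.2))
      ((PySem.Dict.empty, []) : PySem.Dict PvK (List PvT) × List PvT)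
    (st.1.values, st.2)) = _
  simp only []
  have hfun : (fun (st : PySem.Dict PvK (List PvT) × List PvT) tpl =>
        if ((xs.foldl (fun d tpl => d.insert (pvKey tpl) (d.getD (pvKey tpl) 0 + 1))
              (PySem.Dict.empty : PySem.Dict PvK Int)).getD (pvKey tpl) 0 == 1)
        then (st.1, st.2 ++ [tpl])
        else (st.1.modify (pvKey tpl) [] (fun l => l ++ [tpl]), st.2))
      = (fun st tpl =>
        if ((pvGrp xs (pvKey tpl)).length == 1) then (st.1, st.2 ++ [tpl])
        else (st.1.modify (pvKey tpl) [] (fun l => l ++ [tpl]), st.2)) :=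
    funext fun st => funext fun tpl => by rw [hcond]
  rw [hfun, pvFoldB]
  have hGm : (xs.filter (fun t => !((pvGrp xs (pvKey t)).length == 1))).foldl
        (fun d t => d.modify (pvKey t) [] (fun g => g ++ [t])) PySem.Dict.empty
      = pvGm (xs.filter (fun t => !((pvGrp xs (pvKey t)).length == 1))) := rfl
  rw [hGm, pvValues_Gm, pvG1, List.nil_append, pvG2]

-- ===== VERDICT (by name: the statement is the Claim_ definition above) =====
theorem group_by_s1_spec : Claim_equal_group_by_s1 := by
  intro xs _
  show group_by_s1 xs = group_by_s1_alt xs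
  rw [pvA_eq xs, pvB_eq xs]
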